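-- pv_equiv track=rewrite | github.com/bradbrownjr/bpq-apps | apps/wiki.py | filter_links_in_text
-- ===== SOURCE A (Python) =====
-- def filter_links_in_text(all_links, text):
--     """Filter links to only those whose titles appear in the text"""
--     text_lower = text.lower()
--     found_links = []
--     seen = set()
--
--     for link in all_links:
--         link_lower = link.lower()
--         # Check if link title appears in text (as whole word or phrase)
--         if link_lower in text_lower and link_lower not in seen:
--             found_links.append(link)
--             seen.add(link_lower)
--
--     # Sort by order of appearance in text
--     found_links.sort(key=lambda x: text_lower.find(x.lower()))
--     return found_links
-- ===== SOURCE B (Python) =====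
-- def filter_links_in_text(all_links, text):
--     """Filter links to only those whose titles appear in the text"""
--     text_lower = text.lower()
--     # de-duplicate by lowercased title, keeping the first spelling
--     pending = []
--     pending_lowers = set()
--     for link in all_links:
--         link_lower = link.lower()
--         if link_lower not in pending_lowers:
--             pending.append((link_lower, link))
--             pending_lowers.add(link_lower)
--     # one left-to-right sweep over the text: links come out already
--     # ordered by first occurrence (ties by original list order), no sort
--     found = []
--     for pos in range(len(text_lower) + 1):
--         if not pending:
--             break
--         still = []
--         for link_lower, link in pending:
--             if text_lower.startswith(link_lower, pos):
--                 found.append(link)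
--             else:
--                 still.append((link_lower, link))
--         pending = still
--     return found
-- ===== Notes on version B (the rewrite author's own statement) =====
-- stated objective: alternative
-- what changed: Instead of substring-testing every link and then stably sorting the hits by text.find, B de-duplicates the links once and makes a single left-to-right sweep over text positions, emitting each link the first time it matches, so the output is produced already in order of first occurrence with no sort and no find calls.
import Mathlib
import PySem

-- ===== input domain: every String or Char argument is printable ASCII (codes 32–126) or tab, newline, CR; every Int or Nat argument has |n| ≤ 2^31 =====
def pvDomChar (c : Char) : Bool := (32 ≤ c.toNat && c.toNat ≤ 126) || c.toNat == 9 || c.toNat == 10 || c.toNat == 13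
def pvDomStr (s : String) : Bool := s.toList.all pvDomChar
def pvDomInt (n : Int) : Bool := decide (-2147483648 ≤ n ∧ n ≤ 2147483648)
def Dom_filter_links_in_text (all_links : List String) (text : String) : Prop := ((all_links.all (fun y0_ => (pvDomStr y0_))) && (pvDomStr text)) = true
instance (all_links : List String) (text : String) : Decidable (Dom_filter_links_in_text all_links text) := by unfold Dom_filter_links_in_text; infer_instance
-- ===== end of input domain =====

-- B replaces "substring-test every link, then stable-sort by text.find" with one
-- left-to-right sweep over text positions that emits each de-duplicated link at its
-- first match, producing the occurrence order directly (no sort); alternative, not faster.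


-- ===== PORT A =====
-- (Python's local names text_lower / link_lower are inlined as their defining expressions.)
def filter_links_in_text (all_links : List String) (text : String) : List String :=
  PySem.List.sorted
    -- for link in all_links: if link_lower in text_lower and link_lower not in seen: append / add
    (all_links.foldl (fun (st : List String × PySem.Set String) link =>
        if PySem.Str.isIn (PySem.Str.lower link) (PySem.Str.lower text)
            && !(st.2.contains (PySem.Str.lower link)) then
          (st.1 ++ [link], st.2.add (PySem.Str.lower link))
        else st) ([], PySem.Set.ofList [])).1
    -- found_links.sort(key=lambda x: text_lower.find(x.lower()))  (stable sort)
    (fun x => PySem.Str.find (PySem.Str.lower text) (PySem.Str.lower x)) false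

-- ===== PORT B =====
-- text_lower.startswith(link_lower, pos) for 0 ≤ pos ≤ len(text_lower) is exactly
-- "link_lower is a prefix of the suffix of text_lower starting at pos" (List.isPrefixOf on drop).
def pvScan (tl : List Char) : List Nat → List (String × String) → List String → List String
  | [], _, found => found
  | _ :: _, [], found => found          -- if not pending: break
  | p :: ps, pending, found =>
      -- one pass over pending: matches are appended to found, the rest stay pending
      let part := pending.partition (fun q => q.1.toList.isPrefixOf (tl.drop p))
      pvScan tl ps part.2 (found ++ part.1.map Prod.snd)

def filter_links_in_text_alt (all_links : List String) (text : String) : List String :=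
  -- de-duplicate by lowercased title, keeping the first spelling
  pvScan (PySem.Str.lower text).toList
    -- for pos in range(len(text_lower) + 1): …
    (List.range ((PySem.Str.lower text).toList.length + 1))
    (all_links.foldl
      (fun (st : List (String × String) × PySem.Set String) link =>
        if st.2.contains (PySem.Str.lower link) then st
        else (st.1 ++ [(PySem.Str.lower link, link)], st.2.add (PySem.Str.lower link)))
      ([], PySem.Set.ofList [])).1
    []

-- ===== PRECONDITION & SPEC =====
def Spec_filter_links_in_text (all_links : List String) (text : String) (out : List String) : Prop := out = filter_links_in_text_alt all_links text
instance (all_links : List String) (text : String) (out : List String) : Decidable (Spec_filter_links_in_text all_links text out) := by unfold Spec_filter_links_in_text; infer_instance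

-- ===== CLAIM (what is proved, stated in full; the proofs are below) =====
def Claim_equal_filter_links_in_text : Prop := ∀ (all_links : List String) (text : String), Dom_filter_links_in_text all_links text → Spec_filter_links_in_text all_links text (filter_links_in_text all_links text)

-- ===== LEMMAS AND PROOFS =====

-- inserting an element after everything it does not go before, and before all the rest
theorem pv_insertBy_middle {α : Type} (before : α → α → Bool) (x : α) :
    ∀ (L1 L2 : List α), (∀ y ∈ L1, before x y = false) → (∀ y ∈ L2, before x y = true) →
      PySem.List.insertBy before x (L1 ++ L2) = L1 ++ x :: L2 := by
  intro L1
  induction L1 with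
  | nil =>
    intro L2 _ h2
    cases L2 with
    | nil => simp [PySem.List.insertBy]
    | cons y ys =>
      have hy : before x y = true := h2 y (by simp)
      simp [PySem.List.insertBy, hy]
  | cons z L1 ih =>
    intro L2 h1 h2
    have hz : before x z = false := h1 z (by simp)
    simp only [List.cons_append, PySem.List.insertBy, hz, Bool.false_eq_true, if_false]
    rw [ih L2 (fun y hy => h1 y (List.mem_cons_of_mem z hy)) h2]

-- a stable sort, bucketized over a strictly increasing key list that covers xs
theorem pv_stable_sort_buckets {α : Type} (key : α → Int) :
    ∀ (xs : List α) (ks : List Int), ks.Pairwise (· < ·) → (∀ x ∈ xs, key x ∈ ks) →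
      PySem.List.sorted xs key false = ks.flatMap (fun k => xs.filter (fun x => key x = k)) := by
  intro xs
  induction xs using List.reverseRecOn with
  | nil => intro ks _ _; simp [PySem.List.sorted_eq_foldl_insertBy]
  | append_singleton xs x ih =>
    intro ks hks hall
    rw [PySem.List.sorted_eq_foldl_insertBy, List.foldl_append, List.foldl_cons, List.foldl_nil,
        ← PySem.List.sorted_eq_foldl_insertBy, ih ks hks (fun y hy => hall y (by simp [hy]))]
    obtain ⟨ks1, ks2, rfl⟩ := List.append_of_mem (hall x (by simp))
    rw [List.pairwise_append] at hks
    obtain ⟨hks1, hks2c, hcross⟩ := hks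
    rw [List.pairwise_cons] at hks2c
    obtain ⟨hklt, hks2⟩ := hks2c
    rw [List.flatMap_append, List.flatMap_cons, ← List.append_assoc]
    rw [pv_insertBy_middle (fun a b => decide (key a < key b)) x
          (ks1.flatMap (fun k => xs.filter (fun y => key y = k)) ++ xs.filter (fun y => key y = key x))
          (ks2.flatMap (fun k => xs.filter (fun y => key y = k)))
          (by
            intro y hy
            rcases List.mem_append.mp hy with hy | hy
            · rw [List.mem_flatMap] at hy
              obtain ⟨k, hk, hyk⟩ := hy
              have hky : key y = k := by simpa using (List.mem_filter.mp hyk).2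
              have : k < key x := hcross k hk (key x) (by simp)
              simp [hky]; omega
            · have hky : key y = key x := by simpa using (List.mem_filter.mp hy).2
              simp [hky])
          (by
            intro y hy
            rw [List.mem_flatMap] at hy
            obtain ⟨k, hk, hyk⟩ := hy
            have hky : key y = k := by simpa using (List.mem_filter.mp hyk).2
            have : key x < k := hklt k hk
            simp [hky]; omega)]
    rw [List.flatMap_append, List.flatMap_cons]
    have h1 : ks1.flatMap (fun k => (xs ++ [x]).filter (fun y => key y = k))
        = ks1.flatMap (fun k => xs.filter (fun y => key y = k)) := by
      apply List.flatMap_congr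
      intro k hk
      rw [List.filter_append]
      have : key x ≠ k := by
        have : k < key x := hcross k hk (key x) (by simp)
        omega
      simp [this]
    have h2 : ks2.flatMap (fun k => (xs ++ [x]).filter (fun y => key y = k))
        = ks2.flatMap (fun k => xs.filter (fun y => key y = k)) := by
      apply List.flatMap_congr
      intro k hk
      rw [List.filter_append]
      have : key x ≠ k := by have : key x < k := hklt k hk; omega
      simp [this]
    have h0 : (xs ++ [x]).filter (fun y => key y = key x)
        = xs.filter (fun y => key y = key x) ++ [x] := by
      rw [List.filter_append]; simp
    rw [h1, h2, h0]
    simp [List.append_assoc]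

-- characterization of Chars.find: it returns p iff the needle first matches at p
theorem pv_find_eq_iff (tl sub : List Char) (p : Nat) :
    PySem.Chars.find tl sub = (p : Int) ↔
      (sub.isPrefixOf (tl.drop p) = true ∧ ∀ i < p, ¬ sub <+: tl.drop i) := by
  constructor
  · intro h
    have h0 : (0 : Int) ≤ PySem.Chars.find tl sub := by rw [h]; exact Int.natCast_nonneg p
    obtain ⟨hpre, hmin⟩ := PySem.Chars.find_spec h0
    have ht : (PySem.Chars.find tl sub).toNat = p := by omega
    rw [ht] at hpre hmin
    exact ⟨List.isPrefixOf_iff_prefix.mpr hpre, hmin⟩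
  · rintro ⟨hp, hmin⟩
    have hp' : sub <+: tl.drop p := List.isPrefixOf_iff_prefix.mp hp
    have hinf : sub <:+: tl := hp'.isInfix.trans (List.drop_suffix p tl).isInfix
    have h0 : (0 : Int) ≤ PySem.Chars.find tl sub := (PySem.Chars.find_nonneg_iff tl sub).mpr hinf
    obtain ⟨hpre, hmin'⟩ := PySem.Chars.find_spec h0
    have ht : (PySem.Chars.find tl sub).toNat = p := by
      rcases lt_trichotomy (PySem.Chars.find tl sub).toNat p with h | h | h
      · exact absurd hpre (hmin _ h)
      · exact h
      · exact absurd hp' (hmin' p h)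
    omega

-- the sweep collects, position by position, exactly the find-buckets of the pending list
theorem pv_scan_spec (tl : List Char) :
    ∀ (ps : List Nat) (P : List (String × String)) (found : List String) (p0 : Nat),
      ps = List.range' p0 ps.length →
      (∀ q ∈ P, ∀ i < p0, ¬ q.1.toList <+: tl.drop i) →
      pvScan tl ps P found
        = found ++ ps.flatMap
            (fun (k : Nat) => (P.filter (fun q => PySem.Chars.find tl q.1.toList = (k : Int))).map Prod.snd) := by
  intro ps
  induction ps with
  | nil => intro P found p0 _ _; simp [pvScan]
  | cons p ps ih =>
    intro P found p0 hr hinv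
    rw [List.length_cons, List.range'_succ] at hr
    have hp : p0 = p := by
      have := List.head_eq_of_cons_eq hr.symm
      omega
    subst hp
    have hr' : ps = List.range' (p0 + 1) ps.length := List.tail_eq_of_cons_eq hr.symm |>.symm
    cases P with
    | nil => simp [pvScan]
    | cons q P' =>
      rw [show pvScan tl (p0 :: ps) (q :: P') found
            = pvScan tl ps
                ((q :: P').filter (not ∘ (fun r => r.1.toList.isPrefixOf (tl.drop p0))))
                (found ++ ((q :: P').filter (fun r => r.1.toList.isPrefixOf (tl.drop p0))).map Prod.snd)
          from by simp [pvScan, List.partition_eq_filter_filter]]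
      have hinv' : ∀ r ∈ (q :: P').filter (not ∘ (fun r : String × String => r.1.toList.isPrefixOf (tl.drop p0))),
          ∀ i < p0 + 1, ¬ r.1.toList <+: tl.drop i := by
        intro r hrm i hi
        rw [List.mem_filter] at hrm
        obtain ⟨hrQ, hnp⟩ := hrm
        rcases Nat.lt_succ_iff_lt_or_eq.mp hi with h | h
        · exact hinv r hrQ i h
        · subst h
          intro hpre
          have := List.isPrefixOf_iff_prefix.mpr hpre
          simp [Function.comp, this] at hnp
      rw [ih _ _ (p0 + 1) hr' hinv']
      have hmatch : (q :: P').filter (fun r => r.1.toList.isPrefixOf (tl.drop p0))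
          = (q :: P').filter (fun r => PySem.Chars.find tl r.1.toList = ((p0 : Nat) : Int)) := by
        apply List.filter_congr
        intro r hrQ
        rw [Bool.eq_iff_iff]
        simp only [decide_eq_true_eq]
        constructor
        · intro hpre
          exact (pv_find_eq_iff tl r.1.toList p0).mpr ⟨hpre, fun i hi => hinv r hrQ i hi⟩
        · intro hf
          exact ((pv_find_eq_iff tl r.1.toList p0).mp hf).1
      have hrest : ∀ k : Nat, p0 < k →
          ((q :: P').filter (not ∘ (fun r : String × String => r.1.toList.isPrefixOf (tl.drop p0)))).filter
              (fun r => PySem.Chars.find tl r.1.toList = (k : Int))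
            = (q :: P').filter (fun r => PySem.Chars.find tl r.1.toList = (k : Int)) := by
        intro k hk
        rw [List.filter_filter]
        apply List.filter_congr
        intro r hrQ
        by_cases hf : PySem.Chars.find tl r.1.toList = (k : Int)
        · obtain ⟨_, hmin⟩ := (pv_find_eq_iff tl r.1.toList k).mp hf
          have hnp : ¬ r.1.toList <+: tl.drop p0 := hmin p0 hk
          have : r.1.toList.isPrefixOf (tl.drop p0) = false := by
            rw [← Bool.not_eq_true]
            intro h
            exact hnp (List.isPrefixOf_iff_prefix.mp h)
          simp [hf, Function.comp, this]
        · simp [hf]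
      have hfl : ps.flatMap (fun (k : Nat) =>
            (((q :: P').filter (not ∘ (fun r : String × String => r.1.toList.isPrefixOf (tl.drop p0)))).filter
                (fun r => PySem.Chars.find tl r.1.toList = (k : Int))).map Prod.snd)
          = ps.flatMap (fun (k : Nat) =>
              ((q :: P').filter (fun r => PySem.Chars.find tl r.1.toList = (k : Int))).map Prod.snd) := by
        apply List.flatMap_congr
        intro k hkmem
        have hk : p0 < k := by
          rw [hr', List.mem_range'_1] at hkmem
          omega
        rw [hrest k hk]
      rw [hfl, hmatch, List.flatMap_cons, List.append_assoc]

-- every pair produced by B's de-duplicating fold stores the lowercase of its link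
theorem pv_fold_fst_lower :
    ∀ (ls : List String) (acc : List (String × String)) (s : PySem.Set String),
      (∀ q ∈ acc, q.1 = PySem.Str.lower q.2) →
      ∀ q ∈ (ls.foldl (fun st link =>
          if st.2.contains (PySem.Str.lower link) then st
          else (st.1 ++ [(PySem.Str.lower link, link)], st.2.add (PySem.Str.lower link)))
          (acc, s)).1, q.1 = PySem.Str.lower q.2 := by
  intro ls
  induction ls with
  | nil => intro acc s hacc q hq; exact hacc q hq
  | cons l ls ih =>
    intro acc s hacc q hq
    simp only [List.foldl_cons] at hq
    by_cases hc : s.contains (PySem.Str.lower l) = true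
    · rw [if_pos hc] at hq
      exact ih acc s hacc q hq
    · rw [if_neg hc] at hq
      refine ih _ _ ?_ q hq
      intro r hr
      rcases List.mem_append.mp hr with hr | hr
      · exact hacc r hr
      · simp at hr; subst hr; rfl

-- Set.contains is list membership
theorem pv_set_contains_iff {s : PySem.Set String} {x : String} :
    PySem.Set.contains s x = true ↔ x ∈ s := List.contains_iff_mem

-- A's filtering fold produces exactly the isIn-filtered image of B's de-duplicating fold
theorem pv_fold_rel (tlS : String) :
    ∀ (ls : List String) (accB : List (String × String)) (sA sB : PySem.Set String),
      (∀ l, l ∈ sA ↔ l ∈ sB ∧ PySem.Str.isIn l tlS = true) →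
      (ls.foldl (fun (st : List String × PySem.Set String) link =>
          if PySem.Str.isIn (PySem.Str.lower link) tlS && !(st.2.contains (PySem.Str.lower link)) then
            (st.1 ++ [link], st.2.add (PySem.Str.lower link))
          else st)
          ((accB.filter (fun q => PySem.Str.isIn q.1 tlS)).map Prod.snd, sA)).1
        = ((ls.foldl (fun (st : List (String × String) × PySem.Set String) link =>
            if st.2.contains (PySem.Str.lower link) then st
            else (st.1 ++ [(PySem.Str.lower link, link)], st.2.add (PySem.Str.lower link)))
            (accB, sB)).1.filter (fun q => PySem.Str.isIn q.1 tlS)).map Prod.snd := by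
  intro ls
  induction ls with
  | nil => intro accB sA sB hinv; simp
  | cons l ls ih =>
    intro accB sA sB hinv
    simp only [List.foldl_cons]
    by_cases hB : PySem.Str.lower l ∈ sB
    · have hBc : PySem.Set.contains sB (PySem.Str.lower l) = true := pv_set_contains_iff.mpr hB
      by_cases hin : PySem.Str.isIn (PySem.Str.lower l) tlS = true
      · have hAc : PySem.Set.contains sA (PySem.Str.lower l) = true :=
          pv_set_contains_iff.mpr ((hinv _).mpr ⟨hB, hin⟩)
        have hcA : (PySem.Str.isIn (PySem.Str.lower l) tlS
            && !(PySem.Set.contains sA (PySem.Str.lower l))) = false := by rw [hin, hAc]; rfl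
        simp only [hBc, hcA, Bool.false_eq_true, if_false]
        exact ih accB sA sB hinv
      · have hinb : PySem.Str.isIn (PySem.Str.lower l) tlS = false := by
          simpa using hin
        have hcA : (PySem.Str.isIn (PySem.Str.lower l) tlS
            && !(PySem.Set.contains sA (PySem.Str.lower l))) = false := by rw [hinb]; rfl
        simp only [hBc, hcA, Bool.false_eq_true, if_false]
        exact ih accB sA sB hinv
    · have hBc : PySem.Set.contains sB (PySem.Str.lower l) = false := by
        rw [← Bool.not_eq_true, pv_set_contains_iff]; exact hB
      have hA : PySem.Str.lower l ∉ sA := fun h => hB ((hinv _).mp h).1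
      have hAc : PySem.Set.contains sA (PySem.Str.lower l) = false := by
        rw [← Bool.not_eq_true, pv_set_contains_iff]; exact hA
      by_cases hin : PySem.Str.isIn (PySem.Str.lower l) tlS = true
      · have hcA : (PySem.Str.isIn (PySem.Str.lower l) tlS
            && !(PySem.Set.contains sA (PySem.Str.lower l))) = true := by rw [hin, hAc]; rfl
        simp only [hBc, hcA, Bool.false_eq_true, if_false]
        have hstep : (accB.filter (fun q => PySem.Str.isIn q.1 tlS)).map Prod.snd ++ [l]
            = ((accB ++ [(PySem.Str.lower l, l)]).filter (fun q => PySem.Str.isIn q.1 tlS)).map Prod.snd := by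
          rw [List.filter_append]
          have hin2 : PySem.Chars.isIn (PySem.Chars.lower l.toList) tlS.toList = true := by
            simpa using hin
          simp [hin2]
        rw [hstep]
        refine ih (accB ++ [(PySem.Str.lower l, l)]) (sA.add (PySem.Str.lower l))
          (sB.add (PySem.Str.lower l)) ?_
        intro x
        rw [PySem.Set.mem_add, PySem.Set.mem_add]
        constructor
        · rintro (hx | rfl)
          · obtain ⟨h1, h2⟩ := (hinv x).mp hx
            exact ⟨Or.inl h1, h2⟩
          · exact ⟨Or.inr rfl, hin⟩
        · rintro ⟨hx | rfl, h2⟩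
          · exact Or.inl ((hinv x).mpr ⟨hx, h2⟩)
          · exact Or.inr rfl
      · have hinb : PySem.Str.isIn (PySem.Str.lower l) tlS = false := by
          simpa using hin
        have hcA : (PySem.Str.isIn (PySem.Str.lower l) tlS
            && !(PySem.Set.contains sA (PySem.Str.lower l))) = false := by rw [hinb]; rfl
        simp only [hBc, hcA, Bool.false_eq_true, if_false]
        have hstep : (accB.filter (fun q => PySem.Str.isIn q.1 tlS)).map Prod.snd
            = ((accB ++ [(PySem.Str.lower l, l)]).filter (fun q => PySem.Str.isIn q.1 tlS)).map Prod.snd := by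
          rw [List.filter_append]
          have hinb2 : PySem.Chars.isIn (PySem.Chars.lower l.toList) tlS.toList = false := by
            simpa using hinb
          simp [hinb2]
        rw [hstep]
        refine ih (accB ++ [(PySem.Str.lower l, l)]) sA (sB.add (PySem.Str.lower l)) ?_
        intro x
        rw [PySem.Set.mem_add]
        constructor
        · intro hx
          obtain ⟨h1, h2⟩ := (hinv x).mp hx
          exact ⟨Or.inl h1, h2⟩
        · rintro ⟨hx | rfl, h2⟩
          · exact (hinv x).mpr ⟨hx, h2⟩
          · rw [hinb] at h2
            exact absurd h2 Bool.false_ne_true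

-- ===== VERDICT (by name: the statement is the Claim_ definition above) =====
set_option maxHeartbeats 1000000 in
theorem filter_links_in_text_spec : Claim_equal_filter_links_in_text := by
  intro all_links text _
  unfold Spec_filter_links_in_text filter_links_in_text filter_links_in_text_alt
  have hrel := pv_fold_rel (PySem.Str.lower text) all_links [] (PySem.Set.ofList [])
    (PySem.Set.ofList []) (by intro l; simp)
  simp only [List.filter_nil, List.map_nil] at hrel
  rw [hrel]
  have hlow := pv_fold_fst_lower all_links [] (PySem.Set.ofList []) (by simp)
  set tlS := PySem.Str.lower text with htlS
  set P0 := (all_links.foldl (fun (st : List (String × String) × PySem.Set String) link =>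
      if st.2.contains (PySem.Str.lower link) then st
      else (st.1 ++ [(PySem.Str.lower link, link)], st.2.add (PySem.Str.lower link)))
      ([], PySem.Set.ofList [])).1 with hP0
  -- B side: the sweep is the concatenation of the find-buckets of P0
  rw [pv_scan_spec tlS.toList (List.range (tlS.toList.length + 1)) P0 [] 0
        (by rw [List.length_range]; exact List.range_eq_range') (by intro q hq i hi; omega)]
  -- A side: the stable sort is the same concatenation of buckets
  rw [pv_stable_sort_buckets (fun x => PySem.Str.find tlS (PySem.Str.lower x))
        ((P0.filter (fun q => PySem.Str.isIn q.1 tlS)).map Prod.snd)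
        ((List.range (tlS.toList.length + 1)).map (fun (k : Nat) => (k : Int)))
        (show ((List.range (tlS.toList.length + 1)).map (fun (k : Nat) => (k : Int))).Pairwise (· < ·) from
          List.Pairwise.map (fun (k : Nat) => (k : Int)) (fun a b h => Int.ofNat_lt.mpr h)
            List.pairwise_lt_range)
        ?hall]
  case hall =>
    intro x hx
    rw [List.mem_map] at hx
    obtain ⟨q, hqF, rfl⟩ := hx
    rw [List.mem_filter] at hqF
    obtain ⟨hqP, hqin⟩ := hqF
    have hql : q.1 = PySem.Str.lower q.2 := hlow q hqP
    have h0 : (0 : Int) ≤ PySem.Str.find tlS (PySem.Str.lower q.2) := by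
      rw [← hql]
      exact (PySem.Str.find_nonneg_iff tlS q.1).mpr ((PySem.Str.isIn_iff_infix q.1 tlS).mp hqin)
    have hle : PySem.Str.find tlS (PySem.Str.lower q.2) ≤ (tlS.toList.length : Int) := by
      rw [← hql, PySem.Str.find_eq]
      exact PySem.Chars.find_le_length tlS.toList q.1.toList
    simp only [List.mem_map, List.mem_range]
    exact ⟨(PySem.Str.find tlS (PySem.Str.lower q.2)).toNat, by omega, by omega⟩
  rw [List.flatMap_map]
  have hbuck : ∀ k : Nat,
      ((P0.filter (fun q => PySem.Str.isIn q.1 tlS)).map Prod.snd).filter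
          (fun x => PySem.Str.find tlS (PySem.Str.lower x) = (k : Int))
        = (P0.filter (fun q => PySem.Chars.find tlS.toList q.1.toList = (k : Int))).map Prod.snd := by
    intro k
    rw [List.filter_map]
    have hcong : (P0.filter (fun q => PySem.Str.isIn q.1 tlS)).filter
          ((fun x => decide (PySem.Str.find tlS (PySem.Str.lower x) = (k : Int))) ∘ Prod.snd)
        = (P0.filter (fun q => PySem.Str.isIn q.1 tlS)).filter
          (fun q => PySem.Chars.find tlS.toList q.1.toList = (k : Int)) := by
      apply List.filter_congr
      intro q hq
      rw [List.mem_filter] at hq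
      have hql : q.1 = PySem.Str.lower q.2 := hlow q hq.1
      simp only [Function.comp]
      rw [Bool.eq_iff_iff]
      simp only [decide_eq_true_eq]
      rw [← hql, PySem.Str.find_eq]
    rw [hcong, List.filter_filter]
    congr 1
    apply List.filter_congr
    intro q _
    by_cases hf : PySem.Chars.find tlS.toList q.1.toList = (k : Int)
    · have h0 : (0 : Int) ≤ PySem.Chars.find tlS.toList q.1.toList := by
        rw [hf]; exact Int.natCast_nonneg k
      have hinf : q.1.toList <:+: tlS.toList := (PySem.Chars.find_nonneg_iff _ _).mp h0
      have hisin' : PySem.Chars.isIn q.1.toList tlS.toList = true := by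
        simpa using (PySem.Str.isIn_iff_infix q.1 tlS).mpr hinf
      simp [hf, hisin']
    · simp [hf]
  have hfl : (List.range (tlS.toList.length + 1)).flatMap (fun (k : Nat) =>
        ((P0.filter (fun q => PySem.Str.isIn q.1 tlS)).map Prod.snd).filter
          (fun x => PySem.Str.find tlS (PySem.Str.lower x) = ((k : Nat) : Int)))
      = (List.range (tlS.toList.length + 1)).flatMap (fun (k : Nat) =>
          (P0.filter (fun q => PySem.Chars.find tlS.toList q.1.toList = (k : Int))).map Prod.snd) := by
    apply List.flatMap_congr
    intro k _
    exact hbuck k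
  rw [hfl]
  simp
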